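-- pv_equiv track=rewrite | github.com/LLNL/CallFlow | src/server/diffgraph.py | no_cycle_path
-- ===== SOURCE A (Python) =====
-- def no_cycle_path(path):
--     ret = []
--     mapper = {}
--     for idx, elem in enumerate(path):
--         if elem not in mapper:
--             mapper[elem] = 1
--             ret.append(elem)
--         else:
--             ret.append(elem + "_" + str(mapper[elem]))
--             mapper[elem] += 1
--     return tuple(ret)
-- ===== SOURCE B (Python) =====
-- def no_cycle_path(path):
--     positions = {}
--     for idx, elem in enumerate(path):
--         positions.setdefault(elem, []).append(idx)
--     out = [None] * len(path)
--     for elem, idxs in positions.items():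
--         out[idxs[0]] = elem
--         for k, i in enumerate(idxs[1:], 1):
--             out[i] = elem + "_" + str(k)
--     return tuple(out)
-- ===== Notes on version B (the rewrite author's own statement) =====
-- stated objective: alternative
-- what changed: Replaces A's single left-to-right pass with a maintained counter dict by a group-then-scatter algorithm: first group all indices of each element into a positions dict, then fill a preallocated output array group by group, writing elem at the first index and elem_k at the k-th later index.
import Mathlib
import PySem

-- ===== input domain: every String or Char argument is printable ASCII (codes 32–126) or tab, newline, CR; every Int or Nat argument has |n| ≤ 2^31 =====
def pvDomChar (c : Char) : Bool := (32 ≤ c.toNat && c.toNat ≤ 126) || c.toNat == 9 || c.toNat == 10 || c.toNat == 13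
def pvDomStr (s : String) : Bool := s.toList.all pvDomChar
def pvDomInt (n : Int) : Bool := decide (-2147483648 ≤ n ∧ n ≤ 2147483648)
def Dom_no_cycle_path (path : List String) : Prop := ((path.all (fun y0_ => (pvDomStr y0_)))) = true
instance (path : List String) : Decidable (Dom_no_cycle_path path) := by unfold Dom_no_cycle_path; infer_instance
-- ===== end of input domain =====

-- B replaces A's single pass with a maintained counter dict by a group-then-scatter algorithm:
-- group all indices of each element, then fill a preallocated output array group by group.
-- A returns a tuple built from a list; under the type convention both ports return List String.

-- ===== PORT A =====
-- state = (ret, mapper); mapper[elem] is read with getD, which the branch guarantees is a real lookup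
def no_cycle_path (path : List String) : List String :=
  (PySem.List.enumerate path 0).foldl
    (fun (st : List String × PySem.Dict String Int) p =>
      if st.2.contains p.2 = false then
        (st.1 ++ [p.2], st.2.insert p.2 1)
      else
        (st.1 ++ [p.2 ++ "_" ++ PySem.Int.toStr (st.2.getD p.2 0)],
         st.2.insert p.2 (st.2.getD p.2 0 + 1)))
    ([], PySem.Dict.empty)
  |>.1

-- ===== PORT B =====
-- 'positions.setdefault(elem, []).append(idx)' is Dict.modify keyed by the element, so the grouping
-- fold runs over the (elem, idx) pairs of enumerate. '.toNat' on the stored indices is exact: they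
-- come from enumerate and are ≥ 0. 'out[idxs[0]] = elem' is out.set on the list head; the '[] => out'
-- branch is a totalization guard only (every stored index list is nonempty).
def no_cycle_path_alt (path : List String) : List String :=
  let positions : PySem.Dict String (List Int) :=
    ((PySem.List.enumerate path 0).map (fun p => (p.2, p.1))).foldl
      (fun d q => d.modify q.1 [] (· ++ [q.2])) PySem.Dict.empty
  let out0 : List (Option String) := List.replicate path.length none
  let out := positions.items.foldl
    (fun out g =>
      match g.2 with
      | [] => out
      | h :: t =>
          (PySem.List.enumerate t 1).foldl
            (fun out q => out.set q.2.toNat (some (g.1 ++ "_" ++ PySem.Int.toStr q.1)))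
            (out.set h.toNat (some g.1)))
    out0
  out.map (fun o => o.getD "")

-- ===== PRECONDITION & SPEC =====
def Spec_no_cycle_path (path : List String) (out : List String) : Prop := out = no_cycle_path_alt path
instance (path : List String) (out : List String) : Decidable (Spec_no_cycle_path path out) := by unfold Spec_no_cycle_path; infer_instance

-- ===== CLAIM (what is proved, stated in full; the proofs are below) =====
def Claim_equal_no_cycle_path : Prop := ∀ (path : List String), Dom_no_cycle_path path → Spec_no_cycle_path path (no_cycle_path path)

-- ===== LEMMAS AND PROOFS =====

-- the value both programs place at output position j
def pvRender (path : List String) (j : Nat) : String :=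
  let e := (path[j]?).getD ""
  let c := (path.take j).count e
  if c = 0 then e else e ++ "_" ++ PySem.Int.toStr (c : Int)

-- sequential specification: process 'suf' given the already-seen prefix 'pre'
def pvSpecFrom (pre suf : List String) : List String :=
  match suf with
  | [] => []
  | e :: rest =>
      (if pre.count e = 0 then e else e ++ "_" ++ PySem.Int.toStr (pre.count e)) ::
        pvSpecFrom (pre ++ [e]) rest

lemma pvCounter_step (pre : List String) (e : String) :
    (PySem.Dict.counter pre).insert e ((PySem.Dict.counter pre).getD e 0 + 1)
      = PySem.Dict.counter (pre ++ [e]) := by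
  rw [← PySem.Dict.foldl_insert_getD_add_one_eq_counter pre,
      ← PySem.Dict.foldl_insert_getD_add_one_eq_counter (pre ++ [e]),
      List.foldl_append]
  rfl

lemma pvA_inv (suf : List String) : ∀ (s : Int) (pre ret : List String),
    ((PySem.List.enumerate suf s).foldl
      (fun (st : List String × PySem.Dict String Int) p =>
        if st.2.contains p.2 = false then
          (st.1 ++ [p.2], st.2.insert p.2 1)
        else
          (st.1 ++ [p.2 ++ "_" ++ PySem.Int.toStr (st.2.getD p.2 0)],
           st.2.insert p.2 (st.2.getD p.2 0 + 1)))
      (ret, PySem.Dict.counter pre)).1 = ret ++ pvSpecFrom pre suf := by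
  induction suf with
  | nil => intro s pre ret; simp [PySem.List.enumerate_nil, pvSpecFrom]
  | cons e rest ih =>
      intro s pre ret
      rw [PySem.List.enumerate_cons, List.foldl_cons]
      by_cases h : pre.count e = 0
      · have hc : (PySem.Dict.counter pre).contains e = false := by
          rw [PySem.Dict.contains_counter]
          simpa [List.count_eq_zero] using h
        have h1 : (PySem.Dict.counter pre).insert e 1 = PySem.Dict.counter (pre ++ [e]) := by
          have := pvCounter_step pre e
          rwa [PySem.Dict.getD_counter, h] at this
        simp only [hc, h1, if_true]
        rw [ih (s + 1) (pre ++ [e]) (ret ++ [e])]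
        simp [pvSpecFrom, h]
      · have hmem : e ∈ pre := List.count_pos_iff.mp (Nat.pos_of_ne_zero h)
        have hc : (PySem.Dict.counter pre).contains e = true := by
          rw [PySem.Dict.contains_counter]
          simpa using hmem
        simp only [hc]
        rw [if_neg (by simp : ¬ (true = false)), pvCounter_step,
          ih (s + 1) (pre ++ [e])]
        simp [pvSpecFrom, h, PySem.Dict.getD_counter]

-- the sequential spec is the indexed rendering
lemma pvSpecFrom_eq_map_render (suf : List String) : ∀ pre : List String,
    pvSpecFrom pre suf
      = (List.range suf.length).map (fun j => pvRender (pre ++ suf) (pre.length + j)) := by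
  induction suf with
  | nil => intro pre; simp [pvSpecFrom]
  | cons e rest ih =>
      intro pre
      rw [pvSpecFrom, List.length_cons, List.range_succ_eq_map, List.map_cons, List.map_map]
      congr 1
      · simp only [pvRender, Nat.add_zero]
        have h1 : ((pre ++ e :: rest)[pre.length]?).getD "" = e := by simp
        have h2 : (pre ++ e :: rest).take pre.length = pre := by simp
        rw [h1, h2]
      · rw [ih (pre ++ [e])]
        apply List.map_congr_left
        intro j _
        simp only [Function.comp_apply, List.length_append, List.length_singleton,
          List.append_assoc, List.singleton_append]
        congr 1
        omega

-- indices of e in path, in order (what the positions dict stores under e)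
def pvIdxsOf (path : List String) (e : String) : List Int :=
  ((PySem.List.enumerate path 0).filter (fun p => p.2 == e)).map (·.1)

lemma pvIdxsOf_snoc (path : List String) (x e : String) :
    pvIdxsOf (path ++ [x]) e
      = pvIdxsOf path e ++ (if x == e then [(path.length : Int)] else []) := by
  unfold pvIdxsOf
  rw [PySem.List.enumerate_append, List.filter_append, List.map_append]
  congr 1
  by_cases h : x == e <;> simp [PySem.List.enumerate_cons, PySem.List.enumerate_nil, h]

-- the k-th stored index of e is the position of e's k-th occurrence
lemma pvIdxs_main (path : List String) (e : String) :
    (pvIdxsOf path e).length = path.count e ∧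
    ∀ (k : Nat) (j : Int), (pvIdxsOf path e)[k]? = some j →
      ∃ jn : Nat, j = (jn : Int) ∧ jn < path.length ∧ (path[jn]?).getD "" = e ∧
        (path.take jn).count e = k := by
  induction path using List.reverseRecOn with
  | nil => simp [pvIdxsOf, PySem.List.enumerate_nil]
  | append_singleton path x ih =>
      obtain ⟨ihlen, ihel⟩ := ih
      rw [pvIdxsOf_snoc]
      by_cases hx : x = e
      · subst hx
        simp only [beq_self_eq_true, if_true]
        constructor
        · simp [ihlen, List.count_append]
        · intro k j hk
          rcases Nat.lt_or_ge k (pvIdxsOf path x).length with hlt | hge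
          · rw [List.getElem?_append_left hlt] at hk
            obtain ⟨jn, rfl, hjn, hel, hcnt⟩ := ihel k j hk
            exact ⟨jn, rfl, by simp; omega,
              by rw [List.getElem?_append_left hjn]; exact hel,
              by rw [List.take_append_of_le_length (Nat.le_of_lt hjn)]; exact hcnt⟩
          · rw [List.getElem?_append_right hge] at hk
            simp only [List.getElem?_singleton] at hk
            split at hk
            · rename_i h0
              refine ⟨path.length, by simpa using hk.symm, by simp, by simp, ?_⟩
              rw [List.take_append_of_le_length (Nat.le_refl _), List.take_length]
              omega
            · simp at hk
      · have hbx : (x == e) = false := by simp [hx]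
        rw [if_neg (by simp [hx]), List.append_nil]
        constructor
        · rw [ihlen, List.count_append]; simp [hx]
        · intro k j hk
          obtain ⟨jn, rfl, hjn, hel, hcnt⟩ := ihel k j hk
          exact ⟨jn, rfl, by simp; omega,
            by rw [List.getElem?_append_left hjn]; exact hel,
            by rw [List.take_append_of_le_length (Nat.le_of_lt hjn)]; exact hcnt⟩

lemma pvIdxs_mem (path : List String) (jn : Nat) (h : jn < path.length) :
    ((jn : Int)) ∈ pvIdxsOf path ((path[jn]?).getD "") := by
  unfold pvIdxsOf
  have hmem : ((jn : Int), path[jn]) ∈ PySem.List.enumerate path 0 := by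
    rw [PySem.List.mem_enumerate_iff]
    exact ⟨jn, h, by simp⟩
  refine List.mem_map.mpr ⟨((jn : Int), path[jn]), ?_, rfl⟩
  refine List.mem_filter.mpr ⟨hmem, ?_⟩
  simp [List.getElem?_eq_getElem h]

lemma pvPositions_getD (path : List String) (e : String) :
    (((PySem.List.enumerate path 0).map (fun p => (p.2, p.1))).foldl
      (fun (d : PySem.Dict String (List Int)) q => d.modify q.1 [] (· ++ [q.2]))
      PySem.Dict.empty).getD e [] = pvIdxsOf path e := by
  rw [PySem.Dict.getD_foldl_modify_append]
  rw [List.filter_map, List.map_map]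
  simp [pvIdxsOf, Function.comp_def]

-- the positions dict holds exactly the grouped index lists, keyed in first-occurrence order
lemma pvPositions_items (path : List String) :
    (((PySem.List.enumerate path 0).map (fun p => (p.2, p.1))).foldl
      (fun (d : PySem.Dict String (List Int)) q => d.modify q.1 [] (· ++ [q.2]))
      PySem.Dict.empty).items
      = (PySem.Set.ofList path).map (fun e => (e, pvIdxsOf path e)) := by
  set d := ((PySem.List.enumerate path 0).map (fun p => (p.2, p.1))).foldl
      (fun (d : PySem.Dict String (List Int)) q => d.modify q.1 [] (· ++ [q.2]))
      PySem.Dict.empty with hd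
  have hnd : d.keys.Nodup := by
    rw [hd]
    exact PySem.Dict.nodup_keys_foldl_modify_key _ Prod.fst _ _ _ (by simp [PySem.Dict.keys_empty])
  have hkeys : d.keys = PySem.Set.ofList path := by
    rw [hd, PySem.Dict.keys_foldl_modify_key]
    rw [List.map_map]
    have hpath : ((PySem.List.enumerate path 0).map (Prod.fst ∘ fun p => (p.2, p.1))) = path := by
      simp [Function.comp_def]
    rw [hpath]
    simp [PySem.Dict.keys_empty, PySem.Set.update, PySem.Set.ofList_eq_foldl]
  rw [PySem.Dict.items_eq_map_keys d hnd [], hkeys]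
  apply List.map_congr_left
  intro e _
  rw [← pvPositions_getD path e, hd]

-- the write list of one group
def pvWrites (g : String × List Int) : List (Nat × Option String) :=
  match g.2 with
  | [] => []
  | h :: t => (h.toNat, some g.1) ::
      (PySem.List.enumerate t 1).map (fun q => (q.2.toNat, some (g.1 ++ "_" ++ PySem.Int.toStr q.1)))

lemma pvWrites_mem (g : String × List Int) (p : Nat × Option String) :
    p ∈ pvWrites g ↔ ∃ (k : Nat) (j : Int), g.2[k]? = some j ∧
      p = (j.toNat, if k = 0 then some g.1
                    else some (g.1 ++ "_" ++ PySem.Int.toStr (k : Int))) := by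
  obtain ⟨e, idxs⟩ := g
  cases idxs with
  | nil => simp [pvWrites]
  | cons h t =>
      simp only [pvWrites, List.mem_cons, List.mem_map]
      constructor
      · rintro (rfl | ⟨q, hq, rfl⟩)
        · exact ⟨0, h, by simp⟩
        · rw [PySem.List.mem_enumerate_iff] at hq
          obtain ⟨k, hk, rfl⟩ := hq
          refine ⟨k + 1, t[k], by simp, ?_⟩
          simp only [if_neg (Nat.succ_ne_zero k)]
          have hcast : (1 : Int) + (k : Int) = ((k+1 : Nat) : Int) := by push_cast; ring
          rw [hcast]
      · rintro ⟨k, j, hk, rfl⟩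
        cases k with
        | zero => left; simp at hk; simp [hk]
        | succ k =>
            right
            have hk' : t[k]? = some j := by simpa using hk
            have hkl : k < t.length := (List.getElem?_eq_some_iff.mp hk').1
            refine ⟨((1 : Int) + k, t[k]), ?_, ?_⟩
            · rw [PySem.List.mem_enumerate_iff]; exact ⟨k, hkl, rfl⟩
            · have ht : t[k] = j := by simpa [List.getElem?_eq_getElem hkl] using hk'
              simp only [if_neg (Nat.succ_ne_zero k), ht]
              have hcast : ((k+1 : Nat) : Int) = (1 : Int) + (k : Int) := by push_cast; ring
              rw [hcast]

-- a fold of position-determined writes, characterized pointwise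
lemma pvSetFold (L : List (Nat × Option String)) :
    ∀ (init : List (Option String)) (g : Nat → Option String),
    (∀ p ∈ L, p.1 < init.length ∧ p.2 = g p.1) →
    ∀ j, (L.foldl (fun o p => o.set p.1 p.2) init)[j]?
        = if j ∈ L.map (·.1) then some (g j) else init[j]? := by
  induction L with
  | nil => intro init g _ j; simp
  | cons p t ih =>
      intro init g hall j
      obtain ⟨hplt, hpv⟩ := hall p (List.mem_cons_self ..)
      rw [List.foldl_cons]
      have hall' : ∀ q ∈ t, q.1 < (init.set p.1 p.2).length ∧ q.2 = g q.1 := by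
        intro q hq
        have := hall q (List.mem_cons_of_mem _ hq)
        simpa using this
      rw [ih (init.set p.1 p.2) g hall' j]
      by_cases hmem : j ∈ t.map (·.1)
      · simp [hmem]
      · simp only [hmem, if_false, List.map_cons, List.mem_cons]
        by_cases hj : j = p.1
        · subst hj
          simp [hplt, hpv]
        · rw [if_neg (by tauto), List.getElem?_set_ne (by omega)]

-- the nested scatter loop is the flat fold over all writes
lemma pvScatter_eq_flat (items : List (String × List Int)) (out0 : List (Option String)) :
    items.foldl
      (fun out g =>
        match g.2 with
        | [] => out
        | h :: t =>
            (PySem.List.enumerate t 1).foldl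
              (fun out q => out.set q.2.toNat (some (g.1 ++ "_" ++ PySem.Int.toStr q.1)))
              (out.set h.toNat (some g.1)))
      out0
    = (items.flatMap pvWrites).foldl (fun o p => o.set p.1 p.2) out0 := by
  rw [List.foldl_flatMap]
  apply PySem.List.foldl_congr_mem
  intro out g _
  obtain ⟨e, idxs⟩ := g
  cases idxs with
  | nil => simp [pvWrites]
  | cons h t => simp only [pvWrites, List.foldl_cons, List.foldl_map]

lemma pvB_eq_map_render (path : List String) :
    no_cycle_path_alt path = (List.range path.length).map (pvRender path) := by
  unfold no_cycle_path_alt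
  dsimp only
  rw [pvPositions_items, pvScatter_eq_flat]
  set L := ((PySem.Set.ofList path).map (fun e => (e, pvIdxsOf path e))).flatMap pvWrites with hL
  set g : Nat → Option String := fun j => some (pvRender path j) with hg
  have hall : ∀ p ∈ L, p.1 < (List.replicate path.length (none : Option String)).length
      ∧ p.2 = g p.1 := by
    intro p hp
    rw [hL, List.mem_flatMap] at hp
    obtain ⟨grp, hgrp, hpw⟩ := hp
    rw [List.mem_map] at hgrp
    obtain ⟨e, he, rfl⟩ := hgrp
    rw [pvWrites_mem] at hpw
    obtain ⟨k, j, hkj, rfl⟩ := hpw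
    obtain ⟨jn, rfl, hjn, hel, hcnt⟩ := (pvIdxs_main path e).2 k j hkj
    have htn : ((jn : Int)).toNat = jn := Int.toNat_natCast jn
    refine ⟨by simpa [htn] using hjn, ?_⟩
    rw [hg]
    simp only [htn, pvRender, hel, hcnt]
    split <;> simp
  have hfold := pvSetFold L (List.replicate path.length none) g hall
  have hcov : ∀ jn, jn < path.length → jn ∈ L.map (·.1) := by
    intro jn hjn
    set e := (path[jn]?).getD "" with he
    have hmem : ((jn : Int)) ∈ pvIdxsOf path e := pvIdxs_mem path jn hjn
    obtain ⟨k, hk, hkeq⟩ := List.mem_iff_getElem.mp hmem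
    have hk? : (pvIdxsOf path e)[k]? = some ((jn : Int)) := by
      rw [List.getElem?_eq_getElem hk, hkeq]
    have hwmem : ((jn : Int)).toNat ∈ (pvWrites (e, pvIdxsOf path e)).map (·.1) := by
      rw [List.mem_map]
      refine ⟨(((jn : Int)).toNat, if k = 0 then some e
        else some (e ++ "_" ++ PySem.Int.toStr (k : Int))), ?_, rfl⟩
      rw [pvWrites_mem]
      exact ⟨k, (jn : Int), hk?, rfl⟩
    have hepath : e ∈ path := by
      rw [he, List.getElem?_eq_getElem hjn]
      exact List.getElem_mem hjn
    have hgrp : (e, pvIdxsOf path e) ∈ (PySem.Set.ofList path).map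
        (fun e => (e, pvIdxsOf path e)) :=
      List.mem_map.mpr ⟨e, (PySem.Set.mem_ofList path e).mpr hepath, rfl⟩
    rw [hL, List.map_flatMap, List.mem_flatMap]
    refine ⟨(e, pvIdxsOf path e), hgrp, ?_⟩
    simpa [Int.toNat_natCast] using hwmem
  apply List.ext_getElem?
  intro j
  rw [List.getElem?_map, hfold j]
  by_cases hj : j < path.length
  · rw [if_pos (hcov j hj), hg]
    simp [hj]
  · have hnot : j ∉ L.map (·.1) := by
      intro hmem
      rw [List.mem_map] at hmem
      obtain ⟨p, hp, rfl⟩ := hmem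
      have := (hall p hp).1
      simp at this
      omega
    rw [if_neg hnot]
    rw [List.getElem?_replicate]
    simp [hj]

-- ===== VERDICT (by name: the statement is the Claim_ definition above) =====
theorem no_cycle_path_spec : Claim_equal_no_cycle_path := by
  intro path _
  unfold Spec_no_cycle_path
  have hA := pvA_inv path 0 [] []
  simp only [PySem.Dict.counter, List.foldl_nil] at hA
  simp only [List.nil_append] at hA
  show no_cycle_path path = no_cycle_path_alt path
  rw [show no_cycle_path path = pvSpecFrom [] path from hA,
      pvSpecFrom_eq_map_render path [], pvB_eq_map_render path]
  simp
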